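-- pv_equiv track=rewrite | github.com/pjv-stack/synapse-system-pro | .synapse/agents/docs-writer/tools/synapse_integration.py | _generate_style_recommendations
-- ===== SOURCE A (Python) =====
-- from typing import Dict, Any, List, Optional
--
-- def _generate_style_recommendations(style_guides: List[Dict]) -> List[str]:
--     """Generate recommendations based on style guides."""
--     recommendations = []
--
--     if not style_guides:
--         recommendations.extend([
--             "Use clear, concise language",
--             "Structure content with headings",
--             "Include practical examples",
--             "Maintain consistent formatting"
--         ])
--         return recommendations
--
--     # Analyze common themes
--     all_guidelines = []
--     for guide in style_guides:
--         all_guidelines.extend(guide.get("guidelines", []))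
--
--     # Common recommendation patterns
--     common_themes = {
--         "clarity": ["clear", "simple", "concise"],
--         "structure": ["heading", "section", "organize"],
--         "examples": ["example", "sample", "demonstrate"],
--         "consistency": ["consistent", "uniform", "standard"]
--     }
--
--     for theme, keywords in common_themes.items():
--         if any(any(keyword in guideline.lower() for keyword in keywords) for guideline in all_guidelines):
--             if theme == "clarity":
--                 recommendations.append("Prioritize clear, simple language")
--             elif theme == "structure":
--                 recommendations.append("Use proper heading hierarchy")
--             elif theme == "examples":
--                 recommendations.append("Include practical examples")
--             elif theme == "consistency":
--                 recommendations.append("Maintain consistent formatting")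
--
--     return recommendations or ["Follow established documentation standards"]
-- ===== SOURCE B (Python) =====
-- def _generate_style_recommendations(style_guides):
--     """Generate recommendations based on style guides."""
--     if not style_guides:
--         return [
--             "Use clear, concise language",
--             "Structure content with headings",
--             "Include practical examples",
--             "Maintain consistent formatting",
--         ]
--
--     themes = [
--         ("clarity", ["clear", "simple", "concise"], "Prioritize clear, simple language"),
--         ("structure", ["heading", "section", "organize"], "Use proper heading hierarchy"),
--         ("examples", ["example", "sample", "demonstrate"], "Include practical examples"),
--         ("consistency", ["consistent", "uniform", "standard"], "Maintain consistent formatting"),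
--     ]
--
--     # Single pass over the guidelines: lowercase each once, collect matched theme names.
--     matched = set()
--     for guide in style_guides:
--         for guideline in guide.get("guidelines", []):
--             low = guideline.lower()
--             for name, keywords, _rec in themes:
--                 if name not in matched and any(k in low for k in keywords):
--                     matched.add(name)
--
--     recommendations = [rec for name, _kw, rec in themes if name in matched]
--     return recommendations or ["Follow established documentation standards"]
-- ===== Notes on version B (the rewrite author's own statement) =====
-- stated objective: alternative
-- what changed: Instead of A's per-theme rescan of the whole guideline list (lowercasing every guideline once per keyword test), B makes one pass over the guidelines, lowercases each exactly once, accumulates the set of matched theme names, and then emits recommendations from a single (name, keywords, recommendation) table in its fixed order.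
import Mathlib
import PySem

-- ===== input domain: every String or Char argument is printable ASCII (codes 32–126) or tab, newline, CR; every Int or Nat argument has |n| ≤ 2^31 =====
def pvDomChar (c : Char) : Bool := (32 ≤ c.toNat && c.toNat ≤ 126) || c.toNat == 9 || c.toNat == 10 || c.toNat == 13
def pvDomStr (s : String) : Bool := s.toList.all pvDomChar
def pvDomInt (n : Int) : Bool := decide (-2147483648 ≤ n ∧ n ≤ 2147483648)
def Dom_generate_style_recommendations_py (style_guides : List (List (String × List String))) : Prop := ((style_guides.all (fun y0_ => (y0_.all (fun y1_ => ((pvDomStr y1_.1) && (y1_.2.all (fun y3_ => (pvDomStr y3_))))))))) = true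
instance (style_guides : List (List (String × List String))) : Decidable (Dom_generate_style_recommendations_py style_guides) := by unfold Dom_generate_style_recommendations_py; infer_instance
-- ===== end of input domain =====

-- B replaces A's per-theme rescans of the guideline list by a single pass that lowercases each
-- guideline once and accumulates the set of matched theme names (objective: alternative/simpler).

-- ===== PORT A =====
-- items of A's common_themes dict, in insertion order
def pvGRecThemesA : List (String × List String) :=
  [("clarity", ["clear", "simple", "concise"]),
   ("structure", ["heading", "section", "organize"]),
   ("examples", ["example", "sample", "demonstrate"]),
   ("consistency", ["consistent", "uniform", "standard"])]

def generate_style_recommendations_py (style_guides : List (List (String × List String))) : List String :=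
  if style_guides = [] then
    ["Use clear, concise language", "Structure content with headings",
     "Include practical examples", "Maintain consistent formatting"]
  else
    let all_guidelines := style_guides.foldl
      (fun acc guide => acc ++ (PySem.Dict.mk guide).getD "guidelines" []) []
    let recommendations := pvGRecThemesA.foldl (fun recs tk =>
      if all_guidelines.any (fun g => tk.2.any (fun kw => PySem.Str.isIn kw (PySem.Str.lower g))) then
        if tk.1 = "clarity" then recs ++ ["Prioritize clear, simple language"]
        else if tk.1 = "structure" then recs ++ ["Use proper heading hierarchy"]
        else if tk.1 = "examples" then recs ++ ["Include practical examples"]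
        else if tk.1 = "consistency" then recs ++ ["Maintain consistent formatting"]
        else recs
      else recs) []
    if recommendations = [] then ["Follow established documentation standards"] else recommendations

-- ===== PORT B =====
-- B's theme table: (name, keywords, recommendation)
def pvGRecThemesB : List (String × List String × String) :=
  [("clarity", (["clear", "simple", "concise"], "Prioritize clear, simple language")),
   ("structure", (["heading", "section", "organize"], "Use proper heading hierarchy")),
   ("examples", (["example", "sample", "demonstrate"], "Include practical examples")),
   ("consistency", (["consistent", "uniform", "standard"], "Maintain consistent formatting"))]

-- body of B's inner loop: process one guideline, adding matched theme names to the set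
def pvGRecMark (m : PySem.Set String) (g : String) : PySem.Set String :=
  let low := PySem.Str.lower g
  pvGRecThemesB.foldl (fun m t =>
    if !(PySem.Set.contains m t.1) && t.2.1.any (fun k => PySem.Str.isIn k low) then
      PySem.Set.add m t.1
    else m) m

def generate_style_recommendations_py_alt (style_guides : List (List (String × List String))) : List String :=
  if style_guides = [] then
    ["Use clear, concise language", "Structure content with headings",
     "Include practical examples", "Maintain consistent formatting"]
  else
    let matched := style_guides.foldl
      (fun m guide => ((PySem.Dict.mk guide).getD "guidelines" []).foldl pvGRecMark m)
      PySem.Set.empty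
    let recommendations :=
      (pvGRecThemesB.filter (fun t => PySem.Set.contains matched t.1)).map (fun t => t.2.2)
    if recommendations = [] then ["Follow established documentation standards"] else recommendations

-- ===== PRECONDITION & SPEC =====
def Spec_generate_style_recommendations_py (style_guides : List (List (String × List String))) (out : List String) : Prop := out = generate_style_recommendations_py_alt style_guides
instance (style_guides : List (List (String × List String))) (out : List String) : Decidable (Spec_generate_style_recommendations_py style_guides out) := by unfold Spec_generate_style_recommendations_py; infer_instance

-- ===== CLAIM (what is proved, stated in full; the proofs are below) =====
def Claim_equal_generate_style_recommendations_py : Prop := ∀ (style_guides : List (List (String × List String))), Dom_generate_style_recommendations_py style_guides → Spec_generate_style_recommendations_py style_guides (generate_style_recommendations_py style_guides)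

-- ===== LEMMAS AND PROOFS =====

-- keyword hit test for one lowered guideline
def pvHit (kws : List String) (g : String) : Bool :=
  kws.any (fun kw => PySem.Str.isIn kw (PySem.Str.lower g))

theorem pvGRecMark_fold_mem (ts : List (String × List String × String))
    (g : String) (m : PySem.Set String) (name : String) :
    name ∈ (ts.foldl (fun m t =>
        if !(PySem.Set.contains m t.1) && t.2.1.any (fun k => PySem.Str.isIn k (PySem.Str.lower g)) then
          PySem.Set.add m t.1
        else m) m)
    ↔ name ∈ m ∨ ∃ t ∈ ts, name = t.1 ∧ pvHit t.2.1 g = true := by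
  induction ts generalizing m with
  | nil => simp
  | cons t ts ih =>
    simp only [List.foldl_cons]
    by_cases hcond :
        (!(PySem.Set.contains m t.1) && t.2.1.any (fun k => PySem.Str.isIn k (PySem.Str.lower g))) = true
    · rw [if_pos hcond, ih]
      rw [Bool.and_eq_true, Bool.not_eq_true', PySem.Set.contains_eq_listContains] at hcond
      have hhit : pvHit t.2.1 g = true := hcond.2
      simp only [PySem.Set.mem_add, List.mem_cons]
      constructor
      · rintro (⟨hm | he⟩ | ⟨u, hu, he, hh⟩)
        · exact Or.inl hm
        · exact Or.inr ⟨t, Or.inl rfl, he, hhit⟩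
        · exact Or.inr ⟨u, Or.inr hu, he, hh⟩
      · rintro (hm | ⟨u, (rfl | hu), he, hh⟩)
        · exact Or.inl (Or.inl hm)
        · exact Or.inl (Or.inr he)
        · exact Or.inr ⟨u, hu, he, hh⟩
    · rw [if_neg hcond, ih]
      rw [Bool.and_eq_true, not_and_or, Bool.not_eq_true, Bool.not_eq_false',
        PySem.Set.contains_eq_listContains] at hcond
      simp only [List.mem_cons]
      constructor
      · rintro (hm | ⟨u, hu, he, hh⟩)
        · exact Or.inl hm
        · exact Or.inr ⟨u, Or.inr hu, he, hh⟩
      · rintro (hm | ⟨u, (rfl | hu), he, hh⟩)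
        · exact Or.inl hm
        · -- the head theme matched but was skipped: then it was already in m (or no hit)
          rcases hcond with hin | hno
          · subst he; exact Or.inl (by simpa using hin)
          · exact absurd hh (by simpa [pvHit] using hno)
        · exact Or.inr ⟨u, hu, he, hh⟩

theorem pvGRecMark_mem (m : PySem.Set String) (g : String) (name : String) :
    name ∈ pvGRecMark m g
    ↔ name ∈ m ∨ ∃ t ∈ pvGRecThemesB, name = t.1 ∧ pvHit t.2.1 g = true := by
  unfold pvGRecMark
  exact pvGRecMark_fold_mem pvGRecThemesB g m name

theorem pvGRecMark_foldl_mem (gs : List String) (m : PySem.Set String) (name : String) :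
    name ∈ gs.foldl pvGRecMark m
    ↔ name ∈ m ∨ ∃ g ∈ gs, ∃ t ∈ pvGRecThemesB, name = t.1 ∧ pvHit t.2.1 g = true := by
  induction gs generalizing m with
  | nil => simp
  | cons g gs ih =>
    simp only [List.foldl_cons, ih, pvGRecMark_mem, List.mem_cons]
    constructor
    · rintro ((hm | ⟨t, ht, he, hh⟩) | ⟨g', hg', ht⟩)
      · exact Or.inl hm
      · exact Or.inr ⟨g, Or.inl rfl, t, ht, he, hh⟩
      · exact Or.inr ⟨g', Or.inr hg', ht⟩
    · rintro (hm | ⟨g', (rfl | hg'), ht⟩)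
      · exact Or.inl (Or.inl hm)
      · exact Or.inl (Or.inr ht)
      · exact Or.inr ⟨g', hg', ht⟩

-- B's nested fold over guides equals one fold over the flattened guideline list
theorem pvGRec_fold_flat (sg : List (List (String × List String))) (m : PySem.Set String) :
    sg.foldl (fun m guide => ((PySem.Dict.mk guide).getD "guidelines" []).foldl pvGRecMark m) m
    = (sg.flatMap (fun guide => (PySem.Dict.mk guide).getD "guidelines" [])).foldl pvGRecMark m := by
  induction sg generalizing m with
  | nil => simp
  | cons gd sg ih => simp [List.foldl_append, ih]

theorem pvGRec_contains_matched (sg : List (List (String × List String))) (name : String) :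
    PySem.Set.contains
      (sg.foldl (fun m guide => ((PySem.Dict.mk guide).getD "guidelines" []).foldl pvGRecMark m)
        PySem.Set.empty) name
    = (sg.flatMap (fun guide => (PySem.Dict.mk guide).getD "guidelines" [])).any
        (fun g => pvGRecThemesB.any (fun t => name == t.1 && pvHit t.2.1 g)) := by
  rw [Bool.eq_iff_iff, PySem.Set.contains_iff, pvGRec_fold_flat, pvGRecMark_foldl_mem]
  simp only [PySem.Set.empty, List.not_mem_nil, false_or, List.any_eq_true,
    Bool.and_eq_true, beq_iff_eq]

theorem pvGRec_final (φ : String × List String → Bool) (ψ : String → Bool)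
    (e1 : ψ "clarity" = φ ("clarity", ["clear", "simple", "concise"]))
    (e2 : ψ "structure" = φ ("structure", ["heading", "section", "organize"]))
    (e3 : ψ "examples" = φ ("examples", ["example", "sample", "demonstrate"]))
    (e4 : ψ "consistency" = φ ("consistency", ["consistent", "uniform", "standard"])) :
    (if pvGRecThemesA.foldl (fun recs tk =>
        if φ tk = true then
          if tk.1 = "clarity" then recs ++ ["Prioritize clear, simple language"]
          else if tk.1 = "structure" then recs ++ ["Use proper heading hierarchy"]
          else if tk.1 = "examples" then recs ++ ["Include practical examples"]
          else if tk.1 = "consistency" then recs ++ ["Maintain consistent formatting"]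
          else recs
        else recs) [] = []
     then ["Follow established documentation standards"]
     else pvGRecThemesA.foldl (fun recs tk =>
        if φ tk = true then
          if tk.1 = "clarity" then recs ++ ["Prioritize clear, simple language"]
          else if tk.1 = "structure" then recs ++ ["Use proper heading hierarchy"]
          else if tk.1 = "examples" then recs ++ ["Include practical examples"]
          else if tk.1 = "consistency" then recs ++ ["Maintain consistent formatting"]
          else recs
        else recs) [])
    = (if (pvGRecThemesB.filter (fun t => ψ t.1)).map (fun t => t.2.2) = []
       then ["Follow established documentation standards"]
       else (pvGRecThemesB.filter (fun t => ψ t.1)).map (fun t => t.2.2)) := by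
  cases hp1 : φ ("clarity", ["clear", "simple", "concise"]) <;>
  cases hp2 : φ ("structure", ["heading", "section", "organize"]) <;>
  cases hp3 : φ ("examples", ["example", "sample", "demonstrate"]) <;>
  cases hp4 : φ ("consistency", ["consistent", "uniform", "standard"]) <;>
  simp [pvGRecThemesA, pvGRecThemesB, e1, e2, e3, e4, hp1, hp2, hp3, hp4]

-- ===== VERDICT (by name: the statement is the Claim_ definition above) =====
theorem generate_style_recommendations_py_spec : Claim_equal_generate_style_recommendations_py := by
  intro sg _
  unfold Spec_generate_style_recommendations_py
  unfold generate_style_recommendations_py generate_style_recommendations_py_alt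
  by_cases h : sg = []
  · simp [h]
  · simp only [h, if_false]
    rw [PySem.List.foldl_append_eq_flatMap, List.nil_append]
    have hm := pvGRec_contains_matched sg
    set G := sg.flatMap (fun guide => (PySem.Dict.mk guide).getD "guidelines" []) with hG
    clear hG
    clear_value G
    have h1 := hm "clarity"
    have h2 := hm "structure"
    have h3 := hm "examples"
    have h4 := hm "consistency"
    simp only [pvGRecThemesB, pvHit, List.any_cons, List.any_nil, Bool.or_false,
      (by decide : (("clarity":String) == "clarity") = true),
      (by decide : (("clarity":String) == "structure") = false),
      (by decide : (("clarity":String) == "examples") = false),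
      (by decide : (("clarity":String) == "consistency") = false),
      (by decide : (("structure":String) == "clarity") = false),
      (by decide : (("structure":String) == "structure") = true),
      (by decide : (("structure":String) == "examples") = false),
      (by decide : (("structure":String) == "consistency") = false),
      (by decide : (("examples":String) == "clarity") = false),
      (by decide : (("examples":String) == "structure") = false),
      (by decide : (("examples":String) == "examples") = true),
      (by decide : (("examples":String) == "consistency") = false),
      (by decide : (("consistency":String) == "clarity") = false),
      (by decide : (("consistency":String) == "structure") = false),
      (by decide : (("consistency":String) == "examples") = false),
      (by decide : (("consistency":String) == "consistency") = true),
      Bool.true_and, Bool.false_and, Bool.false_or, Bool.or_false] at h1 h2 h3 h4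
    have h1' : (List.foldl (fun m guide => List.foldl pvGRecMark m ((PySem.Dict.mk guide).getD "guidelines" [])) PySem.Set.empty sg).contains "clarity" = G.any (fun g => List.any ["clear", "simple", "concise"] (fun kw => PySem.Str.isIn kw (PySem.Str.lower g))) := by
      rw [h1]; simp only [List.any_cons, List.any_nil, Bool.or_false]
    have h2' : (List.foldl (fun m guide => List.foldl pvGRecMark m ((PySem.Dict.mk guide).getD "guidelines" [])) PySem.Set.empty sg).contains "structure" = G.any (fun g => List.any ["heading", "section", "organize"] (fun kw => PySem.Str.isIn kw (PySem.Str.lower g))) := by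
      rw [h2]; simp only [List.any_cons, List.any_nil, Bool.or_false]
    have h3' : (List.foldl (fun m guide => List.foldl pvGRecMark m ((PySem.Dict.mk guide).getD "guidelines" [])) PySem.Set.empty sg).contains "examples" = G.any (fun g => List.any ["example", "sample", "demonstrate"] (fun kw => PySem.Str.isIn kw (PySem.Str.lower g))) := by
      rw [h3]; simp only [List.any_cons, List.any_nil, Bool.or_false]
    have h4' : (List.foldl (fun m guide => List.foldl pvGRecMark m ((PySem.Dict.mk guide).getD "guidelines" [])) PySem.Set.empty sg).contains "consistency" = G.any (fun g => List.any ["consistent", "uniform", "standard"] (fun kw => PySem.Str.isIn kw (PySem.Str.lower g))) := by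
      rw [h4]; simp only [List.any_cons, List.any_nil, Bool.or_false]
    exact pvGRec_final
      (fun tk => G.any fun g => tk.2.any fun kw => PySem.Str.isIn kw (PySem.Str.lower g))
      (fun name => (List.foldl (fun m guide => List.foldl pvGRecMark m ((PySem.Dict.mk guide).getD "guidelines" [])) PySem.Set.empty sg).contains name)
      h1' h2' h3' h4'
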